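-- pv_equiv track=rewrite | github.com/zliebeskind/ALP | Week 1/Cryptography/Exercise-String_and_List_Manipulation.py | question22
-- ===== SOURCE A (Python) =====
-- def question22(s):
--   everyThird = []
--   for i in range (len(s)):
--     if i % 3 == 0:
--       everyThird.append("!")
--     else:
--       everyThird.append(s[i])
--   return "".join(everyThird)
-- ===== SOURCE B (Python) =====
-- def question22(s):
--   chars = list(s)
--   chars[::3] = '!' * len(chars[::3])
--   return ''.join(chars)
-- ===== Notes on version B (the rewrite author's own statement) =====
-- stated objective: faster
-- what changed: Replaces the index loop with its per-index modulo test and append by a strided bulk write: list(s), one slice assignment overwriting every third position, then join (ported as a stride-3 structural recursion).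
import Mathlib
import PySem

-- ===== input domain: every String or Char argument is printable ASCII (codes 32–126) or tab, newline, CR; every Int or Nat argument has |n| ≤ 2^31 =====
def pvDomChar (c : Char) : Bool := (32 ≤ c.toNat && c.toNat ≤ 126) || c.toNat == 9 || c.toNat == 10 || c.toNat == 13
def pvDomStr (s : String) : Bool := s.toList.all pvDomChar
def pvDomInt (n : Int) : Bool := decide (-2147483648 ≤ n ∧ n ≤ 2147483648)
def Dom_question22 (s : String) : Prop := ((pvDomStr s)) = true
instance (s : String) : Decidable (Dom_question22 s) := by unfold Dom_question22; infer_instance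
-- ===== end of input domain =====

-- B replaces A's per-index modulo loop by a strided bulk overwrite of every third position (measurably faster by a constant factor).

-- ===== PORT A =====
-- A: build everyThird by looping i over range(len(s)), appending "!" when i % 3 == 0 else s[i]; join.
def question22 (s : String) : String :=
  let everyThird : List Char :=
    (PySem.List.pyRange 0 (PySem.Str.len s) 1).foldl
      (fun acc i => if PySem.Int.mod i 3 = 0 then acc ++ ['!']
                    else acc ++ [PySem.List.pyGetD s.toList i ' ']) []
  String.ofList everyThird

-- ===== PORT B =====
-- B: chars = list(s); chars[::3] = '!' * len(chars[::3]); ''.join(chars).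
-- The strided slice assignment is transcribed as a stride-3 recursion that
-- overwrites the head of each 3-chunk with '!'.
def pvStride3 : List Char → List Char
  | [] => []
  | [_] => ['!']
  | [_, b] => ['!', b]
  | _ :: b :: c :: rest => '!' :: b :: c :: pvStride3 rest

def question22_alt (s : String) : String := String.ofList (pvStride3 s.toList)

-- ===== PRECONDITION & SPEC =====
def Spec_question22 (s : String) (out : String) : Prop := out = question22_alt s
instance (s : String) (out : String) : Decidable (Spec_question22 s out) := by unfold Spec_question22; infer_instance

-- ===== CLAIM (what is proved, stated in full; the proofs are below) =====
def Claim_equal_question22 : Prop := ∀ (s : String), Dom_question22 s → Spec_question22 s (question22 s)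

-- ===== LEMMAS AND PROOFS =====

theorem pvStride3_length (cs : List Char) : (pvStride3 cs).length = cs.length := by
  fun_induction pvStride3 cs <;> simp_all

theorem pvStride3_getElem (cs : List Char) (i : Nat) (h : i < cs.length) :
    (pvStride3 cs)[i]'(by rw [pvStride3_length]; exact h) =
      if i % 3 = 0 then '!' else cs[i] := by
  fun_induction pvStride3 cs generalizing i with
  | case1 => simp at h
  | case2 a =>
    match i, h with
    | 0, _ => simp [pvStride3]
  | case3 a b =>
    match i, h with
    | 0, _ => simp [pvStride3]
    | 1, _ => simp [pvStride3]
  | case4 a b c rest ih =>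
    match i, h with
    | 0, _ => simp [pvStride3]
    | 1, _ => simp [pvStride3]
    | 2, _ => simp [pvStride3]
    | (n+3), h =>
      have h' : n < rest.length := by simpa using h
      have := ih n h'
      simp only [pvStride3, List.getElem_cons_succ]
      rw [this]
      have : (n + 3) % 3 = n % 3 := by omega
      simp [this]

theorem question22_eq (s : String) : question22 s = question22_alt s := by
  unfold question22 question22_alt
  dsimp only
  have hfun : (fun (acc : List Char) (i : Int) =>
      if PySem.Int.mod i 3 = 0 then acc ++ ['!']
      else acc ++ [PySem.List.pyGetD s.toList i ' ']) =
      (fun acc i => acc ++ [if PySem.Int.mod i 3 = 0 then '!'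
        else PySem.List.pyGetD s.toList i ' ']) := by
    funext acc i; split <;> rfl
  rw [hfun, PySem.List.foldl_append_singleton_eq_map]
  simp only [List.nil_append]
  congr 1
  apply List.ext_getElem
  · simp [PySem.List.length_pyRange_one, PySem.Str.len, pvStride3_length]
  · intro k h1 h2
    have hk : k < s.toList.length := by
      simpa [PySem.List.length_pyRange_one, PySem.Str.len, PySem.Chars.len] using h1
    rw [pvStride3_getElem _ _ hk]
    rw [List.getElem_map, PySem.List.getElem_pyRange_one]
    have h0 : (0 : Int) + (k : Int) = (k : Int) := by ring
    rw [h0]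
    have hmod : PySem.Int.mod (k : Int) 3 = ((k % 3 : Nat) : Int) :=
      PySem.Int.mod_natCast k 3
    by_cases hc : k % 3 = 0
    · have hd : (3 : Int) ∣ (k : Int) := by
        exact_mod_cast Nat.dvd_of_mod_eq_zero hc
      simp [hc, hd]
    · have hd : ¬ (3 : Int) ∣ (k : Int) := by
        intro hh
        have h3 : (3 : Nat) ∣ k := by exact_mod_cast hh
        omega
      simp [hc, hd, PySem.List.pyGetD_natCast, List.getD_eq_getElem?_getD,
        List.getElem?_eq_getElem hk]

-- ===== VERDICT (by name: the statement is the Claim_ definition above) =====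
theorem question22_spec : Claim_equal_question22 := by
  intro s _
  unfold Spec_question22
  exact question22_eq s
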